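-- pv_equiv track=rewrite | github.com/wuyaoxuehun/colbert | colbert/modeling/cpy/hello_world.py | get_tok_avg_inputs
-- ===== SOURCE A (Python) =====
-- def get_tok_avg_inputs(word_ids, ignore_word_indices, max_span_length):
--     i = 0
--     max_active_len = len([_ for _ in word_ids if _])
--     active_indices = []
--     while i < max_active_len:
--         start = i
--         end = start + 1
--         while end < max_active_len and word_ids[end] == word_ids[start]:
--             end += 1
--         if word_ids[i] not in ignore_word_indices:
--             active_indices.append((start, end))
--         i = end
--
--     active_indices = active_indices[:max_span_length]
--     active_padding = [1] * len(active_indices) + [0] * (max_span_length - len(active_indices))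
--     active_indices = active_indices + [(0, 1)] * (max_span_length - len(active_indices))
--     # active_indices += [0] * (max_seq_length - len(active_indices))
--     return active_indices, active_padding
-- ===== SOURCE B (Python) =====
-- def get_tok_avg_inputs(word_ids, ignore_word_indices, max_span_length):
--     # boundary-based decomposition: find group-start boundaries in the truthy-count
--     # prefix, pair consecutive boundaries into spans, then slice and pad.
--     n = sum(1 for w in word_ids if w)
--     bounds = [p for p in range(n) if p == 0 or word_ids[p] != word_ids[p - 1]] + [n]
--     spans = [(s, e) for s, e in zip(bounds, bounds[1:])
--              if word_ids[s] not in ignore_word_indices]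
--     spans = spans[:max_span_length]
--     rest = max_span_length - len(spans)
--     return spans + [(0, 1)] * rest, [1] * len(spans) + [0] * rest
-- ===== Notes on version B (the rewrite author's own statement) =====
-- stated objective: alternative
-- what changed: B replaces A's nested while loops (inner scan to find each group's end, outer loop jumping to it) by a boundary-list decomposition: one filter pass collects the group-start indices over the truthy-count prefix, consecutive boundaries are zipped into spans, then the same slice-and-pad tail is applied.
import Mathlib
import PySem

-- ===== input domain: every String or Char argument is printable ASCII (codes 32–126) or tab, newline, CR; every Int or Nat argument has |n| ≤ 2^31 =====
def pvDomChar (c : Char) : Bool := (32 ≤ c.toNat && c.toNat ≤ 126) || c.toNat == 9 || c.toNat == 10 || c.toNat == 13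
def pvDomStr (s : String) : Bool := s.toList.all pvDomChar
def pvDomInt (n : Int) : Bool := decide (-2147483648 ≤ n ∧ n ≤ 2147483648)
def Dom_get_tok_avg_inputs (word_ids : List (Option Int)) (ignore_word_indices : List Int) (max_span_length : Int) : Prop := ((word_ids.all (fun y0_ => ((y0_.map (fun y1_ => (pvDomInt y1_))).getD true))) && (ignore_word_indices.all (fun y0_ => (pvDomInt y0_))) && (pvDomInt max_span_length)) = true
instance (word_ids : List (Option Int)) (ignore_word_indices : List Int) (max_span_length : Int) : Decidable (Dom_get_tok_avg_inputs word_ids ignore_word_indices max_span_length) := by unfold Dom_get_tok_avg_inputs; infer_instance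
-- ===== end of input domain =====

-- B replaces A's nested while loops by a boundary-list decomposition (list of group
-- starts, zipped pairwise into spans); an alternative decomposition of the same task.

-- Python truthiness of an Optional[int]: None and 0 are falsy
def pvTruthy (w : Option Int) : Bool := match w with
  | none => false
  | some v => v != 0

-- 'word_ids[i] in ignore_word_indices' (None never equals an int)
def pvInIgnore (v : Option Int) (ig : List Int) : Bool := match v with
  | none => false
  | some x => ig.contains x

-- ===== PORT A =====
-- Every index below is in range (index < max_active_len ≤ len word_ids), so
-- List.getD _ _ none is exact for Python's word_ids[...].

-- inner loop: 'while end < max_active_len and word_ids[end] == word_ids[start]: end += 1'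
def pvFindEnd (wd : List (Option Int)) (start : Nat) (e : Nat) (n : Nat) : Nat :=
  if e < n then
    if wd.getD e none = wd.getD start none then pvFindEnd wd start (e + 1) n else e
  else e
termination_by n - e

-- needed by pvALoop's termination
theorem pvFindEnd_ge (wd : List (Option Int)) (start e n : Nat) : e ≤ pvFindEnd wd start e n := by
  unfold pvFindEnd
  split
  · split
    · exact le_trans (Nat.le_succ e) (pvFindEnd_ge wd start (e + 1) n)
    · exact le_refl e
  · exact le_refl e
termination_by n - e

-- outer while loop over i, accumulating active_indices
def pvALoop (wd : List (Option Int)) (ig : List Int) (n : Nat) (i : Nat)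
    (acc : List (Int × Int)) : List (Int × Int) :=
  if _h : i < n then
    let e := pvFindEnd wd i (i + 1) n
    pvALoop wd ig n e
      (if pvInIgnore (wd.getD i none) ig then acc else acc ++ [((i : Int), (e : Int))])
  else acc
termination_by n - i
decreasing_by have := pvFindEnd_ge wd i (i + 1) n; omega

def get_tok_avg_inputs (word_ids : List (Option Int)) (ignore_word_indices : List Int) (max_span_length : Int) : (List (Int × Int)) × List Int :=
  let max_active_len := (word_ids.filter (fun w => pvTruthy w)).length
  let active_indices := pvALoop word_ids ignore_word_indices max_active_len 0 []
  let active_indices := PySem.List.slice active_indices none (some max_span_length)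
  let active_padding : List Int :=
    List.replicate active_indices.length 1 ++
      List.replicate (max_span_length - (active_indices.length : Int)).toNat 0
  (active_indices ++
     List.replicate (max_span_length - (active_indices.length : Int)).toNat ((0 : Int), (1 : Int)),
   active_padding)

-- ===== PORT B =====
def get_tok_avg_inputs_alt (word_ids : List (Option Int)) (ignore_word_indices : List Int) (max_span_length : Int) : (List (Int × Int)) × List Int :=
  let n := word_ids.countP (fun w => pvTruthy w)
  let bounds := ((List.range n).filter
      (fun p => p == 0 || word_ids.getD p none != word_ids.getD (p - 1) none)) ++ [n]
  let spans := ((bounds.zip bounds.tail).filter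
      (fun se => !pvInIgnore (word_ids.getD se.1 none) ignore_word_indices)).map
      (fun se => ((se.1 : Int), (se.2 : Int)))
  let spans := PySem.List.slice spans none (some max_span_length)
  let rest := (max_span_length - (spans.length : Int)).toNat
  (spans ++ List.replicate rest ((0 : Int), (1 : Int)),
   List.replicate spans.length 1 ++ List.replicate rest 0)

-- ===== PRECONDITION & SPEC =====
def Spec_get_tok_avg_inputs (word_ids : List (Option Int)) (ignore_word_indices : List Int) (max_span_length : Int) (out : (List (Int × Int)) × List Int) : Prop := out = get_tok_avg_inputs_alt word_ids ignore_word_indices max_span_length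
instance (word_ids : List (Option Int)) (ignore_word_indices : List Int) (max_span_length : Int) (out : (List (Int × Int)) × List Int) : Decidable (Spec_get_tok_avg_inputs word_ids ignore_word_indices max_span_length out) := by unfold Spec_get_tok_avg_inputs; infer_instance

-- ===== CLAIM (what is proved, stated in full; the proofs are below) =====
def Claim_equal_get_tok_avg_inputs : Prop := ∀ (word_ids : List (Option Int)) (ignore_word_indices : List Int) (max_span_length : Int), Dom_get_tok_avg_inputs word_ids ignore_word_indices max_span_length → Spec_get_tok_avg_inputs word_ids ignore_word_indices max_span_length (get_tok_avg_inputs word_ids ignore_word_indices max_span_length)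

-- ===== LEMMAS AND PROOFS =====

-- proof-side reference: the raw list of (start, end) group pairs from position i
def pvRaw (wd : List (Option Int)) (n i : Nat) : List (Nat × Nat) :=
  if _h : i < n then
    (i, pvFindEnd wd i (i + 1) n) :: pvRaw wd n (pvFindEnd wd i (i + 1) n)
  else []
termination_by n - i
decreasing_by have := pvFindEnd_ge wd i (i + 1) n; omega

theorem pvALoop_eq_raw (wd : List (Option Int)) (ig : List Int) (n i : Nat)
    (acc : List (Int × Int)) :
    pvALoop wd ig n i acc = acc ++ (pvRaw wd n i).filterMap
      (fun se => if pvInIgnore (wd.getD se.1 none) ig then none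
                 else some ((se.1 : Int), (se.2 : Int))) := by
  unfold pvALoop pvRaw
  split
  · rw [pvALoop_eq_raw]
    simp only [List.filterMap_cons]
    split <;> simp
  · simp
termination_by n - i
decreasing_by have := pvFindEnd_ge wd i (i + 1) n; omega

theorem pvFindEnd_le (wd : List (Option Int)) (start e n : Nat) (h : e ≤ n) :
    pvFindEnd wd start e n ≤ n := by
  unfold pvFindEnd
  split
  · split
    · exact pvFindEnd_le wd start (e + 1) n (by omega)
    · exact h
  · exact h
termination_by n - e

-- every position scanned over equals the start
theorem pvFindEnd_mid (wd : List (Option Int)) (start e n : Nat) (p : Nat)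
    (h1 : e ≤ p) (h2 : p < pvFindEnd wd start e n) :
    wd.getD p none = wd.getD start none := by
  unfold pvFindEnd at h2
  split at h2
  · split at h2
    · rcases Nat.eq_or_lt_of_le h1 with h | h
      · subst h; assumption
      · exact pvFindEnd_mid wd start (e + 1) n p h h2
    · omega
  · omega
termination_by n - e

theorem pvFindEnd_stop (wd : List (Option Int)) (start e n : Nat)
    (h : pvFindEnd wd start e n < n) :
    wd.getD (pvFindEnd wd start e n) none ≠ wd.getD start none := by
  unfold pvFindEnd
  unfold pvFindEnd at h
  split at h
  · split at h
    · rw [if_pos (by omega), if_pos (by assumption)]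
      exact pvFindEnd_stop wd start (e + 1) n h
    · rw [if_pos (by omega), if_neg (by assumption)]
      assumption
  · omega
termination_by n - e

-- the boundary predicate of B
def pvP (wd : List (Option Int)) (p : Nat) : Bool :=
  p == 0 || wd.getD p none != wd.getD (p - 1) none

theorem pv_zip_adj_eq_raw (wd : List (Option Int)) (n i : Nat) (hle : i ≤ n)
    (hb : i = n ∨ pvP wd i = true) :
    (((List.range' i (n - i)).filter (pvP wd) ++ [n]).zip
      ((List.range' i (n - i)).filter (pvP wd) ++ [n]).tail) = pvRaw wd n i := by
  rcases Nat.eq_or_lt_of_le hle with h | h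
  · subst h
    rw [pvRaw]
    simp
  · set e := pvFindEnd wd i (i + 1) n with he
    have hei : i + 1 ≤ e := pvFindEnd_ge wd i (i + 1) n
    have hen : e ≤ n := pvFindEnd_le wd i (i + 1) n (by omega)
    -- range' i (n-i) = i :: range' (i+1) (e-(i+1)) ++ range' e (n-e)
    have hrange : List.range' i (n - i) =
        i :: (List.range' (i + 1) (e - (i + 1)) ++ List.range' e (n - e)) := by
      have := @List.range'_append (i + 1) (e - (i + 1)) (n - e) 1
      rw [show i + 1 + 1 * (e - (i + 1)) = e by omega] at this
      rw [show n - i = ((e - (i + 1)) + (n - e)) + 1 by omega, List.range'_succ, this]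
    -- positions strictly between i and e are not boundaries
    have hmid : ∀ p ∈ List.range' (i + 1) (e - (i + 1)), pvP wd p = false := by
      intro p hp
      rw [List.mem_range'_1] at hp
      have hgp : wd.getD p none = wd.getD i none :=
        pvFindEnd_mid wd i (i + 1) n p (by omega) (by omega)
      have hgp1 : wd.getD (p - 1) none = wd.getD i none := by
        rcases Nat.eq_or_lt_of_le (show i + 1 ≤ p by omega) with h' | h'
        · rw [show p - 1 = i by omega]
        · exact pvFindEnd_mid wd i (i + 1) n (p - 1) (by omega) (by omega)
      have hq : wd.getD p none = wd.getD (p - 1) none := by rw [hgp, hgp1]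
      simp only [pvP, Bool.or_eq_false_iff, beq_eq_false_iff_ne, bne_eq_false_iff_eq]
      exact ⟨by omega, hq⟩
    -- head of the boundary list from e is e
    have hhead : (List.range' e (n - e)).filter (pvP wd) ++ [n] =
        e :: ((List.range' (e + 1) (n - (e + 1))).filter (pvP wd) ++
              (if e < n then [n] else [])) := by
      rcases Nat.eq_or_lt_of_le hen with h' | h'
      · simp [h']
      · have hPe : pvP wd e = true := by
          have hne : wd.getD e none ≠ wd.getD i none := pvFindEnd_stop wd i (i + 1) n (by omega)
          have hgp1 : wd.getD (e - 1) none = wd.getD i none := by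
            rcases Nat.eq_or_lt_of_le hei with h'' | h''
            · rw [show e - 1 = i by omega]
            · exact pvFindEnd_mid wd i (i + 1) n (e - 1) (by omega) (by omega)
          simp only [pvP, Bool.or_eq_true, bne_iff_ne]
          exact Or.inr (by rw [hgp1]; exact fun hc => hne hc)
        rw [show n - e = (n - (e + 1)) + 1 by omega, List.range'_succ,
          List.filter_cons_of_pos hPe, if_pos h']
        simp
    have hPi : pvP wd i = true := by
      rcases hb with h' | h'
      · omega
      · exact h'
    rw [hrange, List.filter_cons_of_pos hPi, List.filter_append,
      List.filter_eq_nil_iff.mpr (fun a ha => by simp [hmid a ha]), List.nil_append]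
    rw [List.cons_append, hhead]
    have IH := pv_zip_adj_eq_raw wd n e hen (by
      rcases Nat.eq_or_lt_of_le hen with h' | h'
      · exact Or.inl h'
      · right
        have hne : wd.getD e none ≠ wd.getD i none := pvFindEnd_stop wd i (i + 1) n (by omega)
        have hgp1 : wd.getD (e - 1) none = wd.getD i none := by
          rcases Nat.eq_or_lt_of_le hei with h'' | h''
          · rw [show e - 1 = i by omega]
          · exact pvFindEnd_mid wd i (i + 1) n (e - 1) (by omega) (by omega)
        simp only [pvP, Bool.or_eq_true, bne_iff_ne]
        exact Or.inr (by rw [hgp1]; exact fun hc => hne hc))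
    rw [hhead] at IH
    rw [pvRaw, dif_pos h, ← he, ← IH]
    simp [List.zip_cons_cons]
termination_by n - i
decreasing_by have := pvFindEnd_ge wd i (i + 1) n; omega

-- filter-then-map as a filterMap
theorem pv_filter_map_eq_filterMap {α β : Type} (q : α → Bool) (f : α → β) (l : List α) :
    (l.filter (fun x => !q x)).map f =
      l.filterMap (fun x => if q x then none else some (f x)) := by
  induction l with
  | nil => rfl
  | cons a t ih =>
    by_cases h : q a <;> simp [h, ih]

-- ===== VERDICT (by name: the statement is the Claim_ definition above) =====
theorem get_tok_avg_inputs_spec : Claim_equal_get_tok_avg_inputs := by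
  intro wd ig m _
  show _ = _
  unfold get_tok_avg_inputs get_tok_avg_inputs_alt
  have hb0 : ∀ n : Nat, 0 = n ∨ pvP wd 0 = true := by
    intro n
    rcases Nat.eq_zero_or_pos n with h | h
    · exact Or.inl h.symm
    · right; simp [pvP]
  have hspans : ∀ n : Nat,
      pvALoop wd ig n 0 [] =
        ((((List.range n).filter
            (fun p => p == 0 || wd.getD p none != wd.getD (p - 1) none) ++ [n]).zip
          (((List.range n).filter
            (fun p => p == 0 || wd.getD p none != wd.getD (p - 1) none) ++ [n])).tail).filter
          (fun se => !pvInIgnore (wd.getD se.1 none) ig)).map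
          (fun se => ((se.1 : Int), (se.2 : Int))) := by
    intro n
    have hPdef : (fun p => p == 0 || wd.getD p none != wd.getD (p - 1) none) = pvP wd := rfl
    rw [hPdef, List.range_eq_range', show List.range' 0 n = List.range' 0 (n - 0) by simp]
    rw [pv_zip_adj_eq_raw wd n 0 (Nat.zero_le n) (hb0 n)]
    rw [pvALoop_eq_raw, pv_filter_map_eq_filterMap]
    simp
  simp only [List.countP_eq_length_filter, hspans]
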